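-- pv_equiv track=rewrite | github.com/svmorris/The-Autonomous-R.A.T.-Machine | agent/agent.py | _strip_action
-- ===== SOURCE A (Python) =====
-- import string
--
-- def _strip_action(message: str) -> str:
--     # remove everything that isn't spaces
--     allowed = string.ascii_lowercase + "\x20"
--     filtered_message = ""
--     for c in message:
--         if c in allowed:
--             filtered_message += c
--
--     # Strip any spaces off
--     filtered_message = filtered_message.strip(" ")
--
--     # remove everything but the first word
--     # Need to make sure that gpt does not use a 2 word name for a tool
--     filtered_message = filtered_message.split(" ")[0]
--
--     return filtered_message
-- ===== SOURCE B (Python) =====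
-- def _strip_action(message: str) -> str:
--     # Single pass: skip leading junk, collect lowercase letters of the first
--     # word, deleting (not splitting on) every other character; stop at the
--     # first space that follows a collected letter.
--     out = []
--     started = False
--     for c in message:
--         if 'a' <= c <= 'z':
--             out.append(c)
--             started = True
--         elif c == ' ':
--             if started:
--                 break
--         # any other character is deleted and never terminates the word
--     return ''.join(out)
-- ===== Notes on version B (the rewrite author's own statement) =====
-- stated objective: simpler
-- what changed: Replaced A's three-phase pipeline (filter to a new string, strip spaces, split and take index 0) by a single-pass scanner with a started flag that breaks at the first space after a letter.
import Mathlib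
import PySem

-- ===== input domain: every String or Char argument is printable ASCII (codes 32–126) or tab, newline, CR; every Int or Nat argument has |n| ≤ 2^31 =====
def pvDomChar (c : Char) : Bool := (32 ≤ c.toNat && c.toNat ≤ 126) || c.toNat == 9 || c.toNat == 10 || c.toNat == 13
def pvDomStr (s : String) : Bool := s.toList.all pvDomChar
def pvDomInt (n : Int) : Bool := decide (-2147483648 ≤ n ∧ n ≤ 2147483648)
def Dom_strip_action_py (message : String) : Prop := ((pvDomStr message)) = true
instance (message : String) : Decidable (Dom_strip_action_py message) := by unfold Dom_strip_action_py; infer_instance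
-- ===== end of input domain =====

-- B replaces A's filter/strip/split pipeline by a single-pass scanner; return values proved equal.

-- ===== PORT A =====
-- allowed = string.ascii_lowercase + "\x20"
def pvAllowed : List Char := "abcdefghijklmnopqrstuvwxyz ".toList

-- literal transliteration of A: build filtered string char by char ('c in allowed' is
-- membership of a single char in the allowed string), strip spaces, split on " ", take [0]
-- (split always returns a nonempty list, so the Python [0] never raises; headD is exact).
def strip_action_py (message : String) : String :=
  let filtered := message.toList.foldl
    (fun acc c => if pvAllowed.contains c then acc ++ [c] else acc) []
  let stripped := PySem.Chars.stripChars filtered [' ']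
  String.ofList ((PySem.Chars.splitOn stripped [' ']).headD [])

-- ===== PORT B =====
-- single-pass scanner over the characters, with a started flag (Source B's loop)
def pvScan : List Char → Bool → List Char → List Char
  | [], _, acc => acc
  | c :: cs, started, acc =>
    if 'a' ≤ c && c ≤ 'z' then pvScan cs true (acc ++ [c])
    else if c == ' ' then (if started then acc else pvScan cs started acc)
    else pvScan cs started acc

def strip_action_py_alt (message : String) : String :=
  String.ofList (pvScan message.toList false [])

-- ===== PRECONDITION & SPEC =====
def Spec_strip_action_py (message : String) (out : String) : Prop := out = strip_action_py_alt message
instance (message : String) (out : String) : Decidable (Spec_strip_action_py message out) := by unfold Spec_strip_action_py; infer_instance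

-- ===== CLAIM (what is proved, stated in full; the proofs are below) =====
def Claim_equal_strip_action_py : Prop := ∀ (message : String), Dom_strip_action_py message → Spec_strip_action_py message (strip_action_py message)

-- ===== LEMMAS AND PROOFS =====

-- membership in the allowed string is exactly "lowercase letter or space"

theorem pvAllowed_contains (c : Char) :
    pvAllowed.contains c = (('a' ≤ c && c ≤ 'z') || c == ' ') := by
  have hto : ∀ d : Char, 'a' ≤ d → d ≤ 'z' → d ∈ pvAllowed := by
    intro d h1 h2
    have n1 : 97 ≤ d.val.toNat := UInt32.le_iff_toNat_le.mp (Char.le_def.mp h1)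
    have n2 : d.val.toNat ≤ 122 := UInt32.le_iff_toNat_le.mp (Char.le_def.mp h2)
    have hcase : d.val.toNat = 97 ∨ d.val.toNat = 98 ∨ d.val.toNat = 99 ∨ d.val.toNat = 100 ∨
        d.val.toNat = 101 ∨ d.val.toNat = 102 ∨ d.val.toNat = 103 ∨ d.val.toNat = 104 ∨
        d.val.toNat = 105 ∨ d.val.toNat = 106 ∨ d.val.toNat = 107 ∨ d.val.toNat = 108 ∨
        d.val.toNat = 109 ∨ d.val.toNat = 110 ∨ d.val.toNat = 111 ∨ d.val.toNat = 112 ∨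
        d.val.toNat = 113 ∨ d.val.toNat = 114 ∨ d.val.toNat = 115 ∨ d.val.toNat = 116 ∨
        d.val.toNat = 117 ∨ d.val.toNat = 118 ∨ d.val.toNat = 119 ∨ d.val.toNat = 120 ∨
        d.val.toNat = 121 ∨ d.val.toNat = 122 := by omega
    have heq : ∀ n : Nat, d.val.toNat = n → ∀ e : Char, e.val.toNat = n → d = e := by
      intro n hn e he
      exact Char.ext (UInt32.toNat_inj.mp (by omega))
    rcases hcase with h|h|h|h|h|h|h|h|h|h|h|h|h|h|h|h|h|h|h|h|h|h|h|h|h|h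
    · rw [heq _ h 'a' (by decide)]; decide
    · rw [heq _ h 'b' (by decide)]; decide
    · rw [heq _ h 'c' (by decide)]; decide
    · rw [heq _ h 'd' (by decide)]; decide
    · rw [heq _ h 'e' (by decide)]; decide
    · rw [heq _ h 'f' (by decide)]; decide
    · rw [heq _ h 'g' (by decide)]; decide
    · rw [heq _ h 'h' (by decide)]; decide
    · rw [heq _ h 'i' (by decide)]; decide
    · rw [heq _ h 'j' (by decide)]; decide
    · rw [heq _ h 'k' (by decide)]; decide
    · rw [heq _ h 'l' (by decide)]; decide
    · rw [heq _ h 'm' (by decide)]; decide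
    · rw [heq _ h 'n' (by decide)]; decide
    · rw [heq _ h 'o' (by decide)]; decide
    · rw [heq _ h 'p' (by decide)]; decide
    · rw [heq _ h 'q' (by decide)]; decide
    · rw [heq _ h 'r' (by decide)]; decide
    · rw [heq _ h 's' (by decide)]; decide
    · rw [heq _ h 't' (by decide)]; decide
    · rw [heq _ h 'u' (by decide)]; decide
    · rw [heq _ h 'v' (by decide)]; decide
    · rw [heq _ h 'w' (by decide)]; decide
    · rw [heq _ h 'x' (by decide)]; decide
    · rw [heq _ h 'y' (by decide)]; decide
    · rw [heq _ h 'z' (by decide)]; decide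
  have hfrom : ∀ d : Char, d ∈ pvAllowed → ('a' ≤ d ∧ d ≤ 'z') ∨ d = ' ' := by
    intro d hd
    have : pvAllowed = ['a','b','c','d','e','f','g','h','i','j','k','l','m','n','o','p','q','r','s','t','u','v','w','x','y','z',' '] := by decide
    rw [this] at hd
    simp only [List.mem_cons, List.not_mem_nil, or_false] at hd
    rcases hd with h|h|h|h|h|h|h|h|h|h|h|h|h|h|h|h|h|h|h|h|h|h|h|h|h|h|h <;>
      subst h <;> first | (left; exact ⟨by decide, by decide⟩) | (right; rfl)
  cases hb : ('a' ≤ c && c ≤ 'z') || c == ' ' with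
  | true =>
    simp only [List.contains_eq_mem, decide_eq_true_eq]  -- guess name
    rcases Bool.or_eq_true_iff.mp hb with h | h
    · obtain ⟨h1, h2⟩ := Bool.and_eq_true_iff.mp h
      exact hto c (of_decide_eq_true h1) (of_decide_eq_true h2)
    · have : c = ' ' := by simpa using h
      subst this; decide
  | false =>
    simp only [List.contains_eq_mem, decide_eq_false_iff_not]
    intro hmem
    rcases hfrom c hmem with ⟨h1, h2⟩ | h
    · simp [h1, h2] at hb
    · subst h; simp at hb

-- once started, the scanner collects letters until the first (kept) space:
theorem pvScan_true (cs : List Char) (acc : List Char) :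
    pvScan cs true acc =
      acc ++ (cs.filter (fun c => pvAllowed.contains c)).takeWhile (fun c => c != ' ') := by
  induction cs generalizing acc with
  | nil => simp [pvScan]
  | cons c cs ih =>
    by_cases hl : ('a' ≤ c && c ≤ 'z') = true
    · have hmem : pvAllowed.contains c = true := by
        rw [pvAllowed_contains]; simp [hl]
      have hne : (c != ' ') = true := by
        simp only [Bool.and_eq_true] at hl
        simp only [bne_iff_ne, ne_eq]
        intro h; subst h; revert hl; decide
      simp only [pvScan, hl, if_true, ih, List.filter_cons, hmem, List.takeWhile_cons, hne,
        List.append_assoc, List.singleton_append]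
    · by_cases hsp : (c == ' ') = true
      · have hmem : pvAllowed.contains c = true := by
          rw [pvAllowed_contains]; simp [hsp]
        have hne : (c != ' ') = false := by simp [bne, hsp]
        rw [Bool.not_eq_true] at hl
        simp only [pvScan, hl, Bool.false_eq_true, if_false, hsp, if_true, List.filter_cons,
          hmem, List.takeWhile_cons, hne, List.append_nil]
      · have hmem : pvAllowed.contains c = false := by
          rw [pvAllowed_contains]
          simp only [Bool.or_eq_false_iff]
          exact ⟨by simpa using hl, by simpa using hsp⟩
        rw [Bool.not_eq_true] at hl hsp
        simp only [pvScan, hl, hsp, Bool.false_eq_true, if_false, ih, List.filter_cons, hmem]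

-- before anything is collected, the scanner also drops leading spaces:
theorem pvScan_false (cs : List Char) :
    pvScan cs false [] =
      ((cs.filter (fun c => pvAllowed.contains c)).dropWhile (fun c => c == ' ')).takeWhile
        (fun c => c != ' ') := by
  induction cs with
  | nil => simp [pvScan]
  | cons c cs ih =>
    by_cases hl : ('a' ≤ c && c ≤ 'z') = true
    · have hmem : pvAllowed.contains c = true := by
        rw [pvAllowed_contains]; simp [hl]
      have hne : (c != ' ') = true := by
        simp only [Bool.and_eq_true] at hl
        simp only [bne_iff_ne, ne_eq]
        intro h; subst h; revert hl; decide
      have hsp : (c == ' ') = false := by simpa [bne] using hne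
      simp only [pvScan, hl, if_true, pvScan_true, List.filter_cons, hmem,
        List.dropWhile_cons, hsp, if_false, Bool.false_eq_true, List.takeWhile_cons, hne,
        List.nil_append, List.singleton_append]
    · by_cases hsp : (c == ' ') = true
      · have hmem : pvAllowed.contains c = true := by
          rw [pvAllowed_contains]; simp [hsp]
        rw [Bool.not_eq_true] at hl
        simp only [pvScan, hl, Bool.false_eq_true, if_false, hsp, if_true, ih, List.filter_cons,
          hmem, List.dropWhile_cons]
      · have hmem : pvAllowed.contains c = false := by
          rw [pvAllowed_contains]
          simp only [Bool.or_eq_false_iff]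
          exact ⟨by simpa using hl, by simpa using hsp⟩
        rw [Bool.not_eq_true] at hl hsp
        simp only [pvScan, hl, hsp, Bool.false_eq_true, if_false, ih, List.filter_cons, hmem]

-- head of splitOn after a split happened is the oldest accumulated word
theorem splitOn_go_head_acc (sep : List Char) (fuel : Nat) (l cur : List Char)
    (acc : List (List Char)) (a : List Char) (h : acc.getLast? = some a) :
    (PySem.Chars.splitOn.go sep fuel l cur acc).headD [] = a := by
  induction fuel generalizing l cur acc with
  | zero =>
    simp [PySem.Chars.splitOn.go, List.headD_eq_head?, List.head?_reverse, List.getLast?_cons, h]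
  | succ fuel ih =>
    cases l with
    | nil =>
      simp [PySem.Chars.splitOn.go, List.headD_eq_head?, List.head?_reverse, List.getLast?_cons, h]
    | cons c rest =>
      rw [PySem.Chars.splitOn.go]
      by_cases hp : sep.isPrefixOf (c :: rest) = true
      · simp only [hp, if_true]
        exact ih _ _ _ (by simp [List.getLast?_cons, h])
      · simp only [hp, if_false]
        exact ih _ _ _ h

-- head of splitOn before any split: collected prefix up to the first space
theorem splitOn_go_head (fuel : Nat) (l cur : List Char) (h : l.length < fuel) :
    (PySem.Chars.splitOn.go [' '] fuel l cur []).headD [] =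
      cur.reverse ++ l.takeWhile (fun c => c != ' ') := by
  induction fuel generalizing l cur with
  | zero => omega
  | succ fuel ih =>
    cases l with
    | nil => simp [PySem.Chars.splitOn.go]
    | cons c rest =>
      rw [PySem.Chars.splitOn.go]
      by_cases hp : [' '].isPrefixOf (c :: rest) = true
      · have hc : c = ' ' := by
          simp [List.isPrefixOf] at hp; exact hp.symm
        subst hc
        simp only [hp, if_true, List.length_cons, List.drop_succ_cons, List.drop_zero]
        rw [splitOn_go_head_acc _ _ _ _ _ (cur.reverse) (by simp)]
        simp [List.takeWhile_cons]
      · have hc : (c == ' ') = false := by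
          cases hcc : c == ' '
          · rfl
          · exact absurd (by simp [List.isPrefixOf, (by simpa using hcc : c = ' ')]) hp
        rw [Bool.not_eq_true] at hp
        simp only [hp, Bool.false_eq_true, if_false]
        rw [ih rest (c :: cur) (by simpa using Nat.lt_of_succ_lt_succ (by simpa using h))]
        have hne : (c != ' ') = true := by simp [bne, hc]
        simp only [List.takeWhile_cons, hne, if_true, List.reverse_cons, List.append_assoc,
          List.singleton_append]

theorem splitOn_head (l : List Char) :
    (PySem.Chars.splitOn l [' ']).headD [] = l.takeWhile (fun c => c != ' ') := by
  rw [PySem.Chars.splitOn]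
  simpa using splitOn_go_head (l.length + 1) l [] (by omega)

-- if the prefix part contains a failing element, a suffix does not matter
theorem takeWhile_append_of_any (q : Char → Bool) (u t : List Char)
    (h : u.any (fun c => !(q c)) = true) :
    (u ++ t).takeWhile q = u.takeWhile q := by
  induction u with
  | nil => simp at h
  | cons c u ih =>
    cases hq : q c
    · simp [List.takeWhile_cons, hq]
    · simp only [List.any_cons, hq, Bool.not_true, Bool.false_or] at h
      simp [List.takeWhile_cons, hq, ih h]

-- trailing spaces removed by the right strip never affect the first word
theorem takeWhile_rdropWhile (l : List Char) :
    ((List.dropWhile (fun c => [' '].contains c) l.reverse).reverse).takeWhile (fun c => c != ' ')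
      = l.takeWhile (fun c => c != ' ') := by
  have hsp : (fun c : Char => [' '].contains c) = (fun c : Char => c == ' ') := by
    funext c; by_cases h : c = ' ' <;> simp [List.contains_cons, h]
  rw [hsp]
  have hrd : (List.dropWhile (fun c => c == ' ') l.reverse).reverse
      = l.rdropWhile (fun c => c == ' ') := by
    simp [List.rdropWhile]
  rw [hrd]
  have hdecomp : (l.rdropWhile (fun c => c == ' ')) ++ (l.rtakeWhile (fun c => c == ' ')) = l :=
    List.rdropWhile_append_rtakeWhile
  by_cases hany : (l.rdropWhile (fun c => c == ' ')).any (fun c => !(c != ' ')) = true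
  · conv_rhs => rw [← hdecomp]
    rw [takeWhile_append_of_any _ _ _ hany]
  · have hall : ∀ c ∈ l.rdropWhile (fun c => c == ' '), (c != ' ') = true := by
      intro c hc
      by_contra hcc
      exact hany (List.any_eq_true.mpr ⟨c, hc, by simp_all⟩)
    have htu : (l.rdropWhile (fun c => c == ' ')).takeWhile (fun c => c != ' ')
        = l.rdropWhile (fun c => c == ' ') := List.takeWhile_eq_self_iff.mpr hall
    conv_rhs => rw [← hdecomp]
    rw [List.takeWhile_append, htu, if_pos rfl]
    cases ht : l.rtakeWhile (fun c => c == ' ') with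
    | nil => simp
    | cons d ds =>
      have hd : d = ' ' := by
        have hm : d ∈ List.rtakeWhile (fun c => c == ' ') l := by
          rw [ht]; exact List.mem_cons_self
        simpa using List.mem_rtakeWhile_imp hm
      have hne : (d != ' ') = false := by simp [bne, hd]
      simp only [List.takeWhile_cons, hne, Bool.false_eq_true, if_false, List.append_nil]

-- ===== VERDICT (by name: the statement is the Claim_ definition above) =====
theorem strip_action_py_spec : Claim_equal_strip_action_py := by
  intro message _
  unfold Spec_strip_action_py strip_action_py strip_action_py_alt
  rw [pvScan_false]
  rw [PySem.List.foldl_append_if_eq_filter]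
  simp only [PySem.Chars.stripChars]
  rw [splitOn_head]
  rw [takeWhile_rdropWhile]
  have hsp : (fun c : Char => [' '].contains c) = (fun c : Char => c == ' ') := by
    funext c; by_cases h : c = ' ' <;> simp [List.contains_cons, h]
  rw [hsp]
  simp only [List.nil_append]
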